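-- pv_equiv track=rewrite | github.com/papakos21/Minesweeper | MinesweeperModel.py | get_coordinate_position_of_bombs_2
-- ===== SOURCE A (Python) =====
-- def get_coordinate_position_of_bombs_2(position_of_bombs, row_size, column_size):
--
--     count = 0
--     coordinates_to_return = []
--     for r in range(row_size):
--         for c in range(column_size):
--             if count in position_of_bombs:
--                 coordinates_to_return.append((r, c))
--             count += 1
--     return coordinates_to_return
-- ===== SOURCE B (Python) =====
-- def get_coordinate_position_of_bombs_2(position_of_bombs, row_size, column_size):
--     total = max(row_size, 0) * max(column_size, 0)
--     valid = sorted({p for p in position_of_bombs if 0 <= p < total})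
--     return [divmod(p, column_size) for p in valid]
-- ===== Notes on version B (the rewrite author's own statement) =====
-- stated objective: faster
-- what changed: Instead of scanning every grid cell and testing membership in the bomb list (O(rows*cols*k)), B filters the bomb indices to the valid range, deduplicates and sorts them, and maps each directly to coordinates with divmod.
import Mathlib
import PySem

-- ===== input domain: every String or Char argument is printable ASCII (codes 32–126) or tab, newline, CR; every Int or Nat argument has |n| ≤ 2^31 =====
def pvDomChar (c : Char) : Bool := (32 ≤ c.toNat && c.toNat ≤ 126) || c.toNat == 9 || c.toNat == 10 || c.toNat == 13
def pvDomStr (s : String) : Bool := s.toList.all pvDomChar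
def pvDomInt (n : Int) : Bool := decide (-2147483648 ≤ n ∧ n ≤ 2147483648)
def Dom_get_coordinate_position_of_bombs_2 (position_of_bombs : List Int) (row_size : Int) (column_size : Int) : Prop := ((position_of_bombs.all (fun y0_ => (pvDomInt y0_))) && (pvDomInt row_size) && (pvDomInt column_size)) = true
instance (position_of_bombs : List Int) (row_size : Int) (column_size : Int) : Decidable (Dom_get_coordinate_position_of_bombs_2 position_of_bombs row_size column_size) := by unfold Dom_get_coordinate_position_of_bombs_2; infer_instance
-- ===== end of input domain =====

-- B replaces A's full-grid scan with membership test by: filter bombs to the valid range,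
-- deduplicate + sort, and map each linear index to coordinates with divmod (faster by the
-- measured/asymptotic change O(rows*cols*k) → O(k log k)).

-- ===== PORT A =====
def get_coordinate_position_of_bombs_2 (position_of_bombs : List Int) (row_size : Int) (column_size : Int) : List (Int × Int) :=
  -- count = 0 ; coordinates_to_return = [] ; for r in range(row_size): for c in range(column_size): …
  let st :=
    (PySem.List.pyRange 0 row_size 1).foldl
      (fun (st : Int × List (Int × Int)) r =>
        (PySem.List.pyRange 0 column_size 1).foldl
          (fun (st : Int × List (Int × Int)) c =>
            (st.1 + 1, if st.1 ∈ position_of_bombs then st.2 ++ [(r, c)] else st.2))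
          st)
      ((0 : Int), ([] : List (Int × Int)))
  st.2

-- ===== PORT B =====
def get_coordinate_position_of_bombs_2_alt (position_of_bombs : List Int) (row_size : Int) (column_size : Int) : List (Int × Int) :=
  let total := max row_size 0 * max column_size 0
  let valid := PySem.List.sorted
      (PySem.Set.ofList (position_of_bombs.filter (fun p => decide (0 ≤ p) && decide (p < total))))
      (fun x => x) false
  valid.map (fun p => (PySem.Int.floordiv p column_size, PySem.Int.mod p column_size))

-- ===== PRECONDITION & SPEC =====
def Spec_get_coordinate_position_of_bombs_2 (position_of_bombs : List Int) (row_size : Int) (column_size : Int) (out : List (Int × Int)) : Prop := out = get_coordinate_position_of_bombs_2_alt position_of_bombs row_size column_size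
instance (position_of_bombs : List Int) (row_size : Int) (column_size : Int) (out : List (Int × Int)) : Decidable (Spec_get_coordinate_position_of_bombs_2 position_of_bombs row_size column_size out) := by unfold Spec_get_coordinate_position_of_bombs_2; infer_instance

-- ===== CLAIM (what is proved, stated in full; the proofs are below) =====
def Claim_equal_get_coordinate_position_of_bombs_2 : Prop := ∀ (position_of_bombs : List Int) (row_size : Int) (column_size : Int), Dom_get_coordinate_position_of_bombs_2 position_of_bombs row_size column_size → Spec_get_coordinate_position_of_bombs_2 position_of_bombs row_size column_size (get_coordinate_position_of_bombs_2 position_of_bombs row_size column_size)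

-- ===== LEMMAS AND PROOFS =====

-- map over an if-filterMap
theorem pv_filterMap_ite {α β : Type} (p : α → Prop) [DecidablePred p] (f : α → β) (l : List α) :
    l.filterMap (fun x => if p x then some (f x) else none)
      = (l.filter (fun x => decide (p x))).map f := by
  induction l with
  | nil => rfl
  | cons a t ih => by_cases h : p a <;> simp [h, ih]

-- inner loop of A: one row, starting at counter `count`
theorem pv_inner (bombs : List Int) (r : Int) (n : Nat) (count : Int) (acc : List (Int × Int)) :
    (PySem.List.pyRange 0 (n : Int) 1).foldl
        (fun (st : Int × List (Int × Int)) c =>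
          (st.1 + 1, if st.1 ∈ bombs then st.2 ++ [(r, c)] else st.2))
        (count, acc)
      = (count + n,
         acc ++ (PySem.List.pyRange count (count + n) 1).filterMap
            (fun k => if k ∈ bombs then some (r, k - count) else none)) := by
  induction n generalizing acc with
  | zero => simp [PySem.List.pyRange_one_eq_nil]
  | succ m ih =>
      rw [show ((m + 1 : Nat) : Int) = (m : Int) + 1 by push_cast; ring,
          PySem.List.pyRange_one_succ_right (by positivity),
          show count + ((m : Int) + 1) = (count + m) + 1 by ring,
          PySem.List.pyRange_one_succ_right (by omega)]
      rw [List.foldl_append, ih]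
      simp only [List.foldl_cons, List.foldl_nil, List.filterMap_append, List.filterMap_cons,
        List.filterMap_nil, Prod.mk.injEq]
      constructor
      · trivial
      · by_cases h : (count + (m : Int)) ∈ bombs <;> simp [h, List.append_assoc]

-- outer loop of A: after m rows the counter is m*col and the result is the filtered prefix
theorem pv_outer (bombs : List Int) (col : Int) (hcol : 0 < col) (m : Nat) :
    (PySem.List.pyRange 0 (m : Int) 1).foldl
        (fun (st : Int × List (Int × Int)) r =>
          (PySem.List.pyRange 0 col 1).foldl
            (fun (st : Int × List (Int × Int)) c =>
              (st.1 + 1, if st.1 ∈ bombs then st.2 ++ [(r, c)] else st.2))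
            st)
        ((0 : Int), ([] : List (Int × Int)))
      = ((m : Int) * col,
         (PySem.List.pyRange 0 ((m : Int) * col) 1).filterMap
            (fun k => if k ∈ bombs then some (PySem.Int.floordiv k col, PySem.Int.mod k col) else none)) := by
  induction m with
  | zero => simp [PySem.List.pyRange_one_eq_nil]
  | succ m ih =>
      rw [show ((m + 1 : Nat) : Int) = (m : Int) + 1 by push_cast; ring,
          PySem.List.pyRange_one_succ_right (by positivity)]
      rw [List.foldl_append, ih]
      simp only [List.foldl_cons, List.foldl_nil]
      have hc : col = ((col.toNat : Nat) : Int) := by omega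
      rw [hc, pv_inner, ← hc]
      have hsplit : PySem.List.pyRange 0 (((m : Int) + 1) * col) 1
          = PySem.List.pyRange 0 ((m : Int) * col) 1
            ++ PySem.List.pyRange ((m : Int) * col) ((m : Int) * col + col) 1 := by
        have : ((m : Int) + 1) * col = (m : Int) * col + col := by ring
        rw [this, PySem.List.pyRange_one_append 0 ((m : Int) * col) _ (by positivity) (by omega)]
      rw [hsplit, List.filterMap_append]
      simp only [Prod.mk.injEq]
      constructor
      · ring
      · congr 1
        apply List.filterMap_congr
        intro k hk
        rw [PySem.List.mem_pyRange_one] at hk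
        have hdiv : PySem.Int.floordiv k col = (m : Int) := by
          rw [PySem.Int.floordiv_eq_iff_of_pos hcol]
          exact ⟨hk.1, by nlinarith [hk.1, hk.2]⟩
        have hmod : PySem.Int.mod k col = k - (m : Int) * col := by
          have := PySem.Int.floordiv_mul_add_mod k col
          rw [hdiv] at this; omega
        rw [hdiv, hmod]

-- the valid bombs, sorted, are exactly the in-range linear indices that are bombs
theorem pv_sorted_eq (bombs : List Int) (total : Int) :
    PySem.List.sorted
        (PySem.Set.ofList (bombs.filter (fun p => decide (0 ≤ p) && decide (p < total))))
        (fun x => x) false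
      = (PySem.List.pyRange 0 total 1).filter (fun k => decide (k ∈ bombs)) := by
  apply PySem.List.sorted_eq_of_perm_of_pairwise_lt
  · apply (List.perm_ext_iff_of_nodup ?_ ?_).mpr
    · intro k
      simp [PySem.List.mem_pyRange_one, PySem.Set.mem_ofList, List.mem_filter]
      tauto
    · exact (PySem.List.nodup_pyRange_one 0 total).filter _
    · exact PySem.Set.nodup_ofList _
  · exact (PySem.List.pairwise_lt_pyRange_one 0 total).filter _

-- ===== VERDICT (by name: the statement is the Claim_ definition above) =====
theorem get_coordinate_position_of_bombs_2_spec : Claim_equal_get_coordinate_position_of_bombs_2 := by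
  intro bombs row col _
  unfold Spec_get_coordinate_position_of_bombs_2
  unfold get_coordinate_position_of_bombs_2 get_coordinate_position_of_bombs_2_alt
  dsimp only
  by_cases hrow : row ≤ 0
  · -- no rows: A's outer range is empty, B's valid range is empty
    rw [PySem.List.pyRange_one_eq_nil hrow]
    have htot : max row 0 * max col 0 = 0 := by rw [max_eq_right hrow, zero_mul]
    have hfil : bombs.filter (fun p => decide (0 ≤ p) && decide (p < max row 0 * max col 0)) = [] := by
      rw [htot]; apply List.filter_eq_nil_iff.mpr; intro p _; simp
    simp [hfil, PySem.Set.ofList, PySem.List.sorted]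
  · by_cases hcol : col ≤ 0
    · -- no columns: every inner loop is empty, the state never changes
      rw [PySem.List.pyRange_one_eq_nil hcol]
      have htot : max row 0 * max col 0 = 0 := by rw [max_eq_right hcol, mul_zero]
      have hfil : bombs.filter (fun p => decide (0 ≤ p) && decide (p < max row 0 * max col 0)) = [] := by
        rw [htot]; apply List.filter_eq_nil_iff.mpr; intro p _; simp
      have hfix : ∀ l : List Int,
          l.foldl (fun (st : Int × List (Int × Int)) r =>
              ([] : List Int).foldl (fun (st : Int × List (Int × Int)) c =>
                (st.1 + 1, if st.1 ∈ bombs then st.2 ++ [(r, c)] else st.2)) st)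
            ((0 : Int), ([] : List (Int × Int)))
            = ((0 : Int), ([] : List (Int × Int))) := by
        intro l; induction l with
        | nil => rfl
        | cons a t ih => exact ih
      rw [hfix]
      simp [hfil, PySem.Set.ofList, PySem.List.sorted]
    · -- main case: 0 < row, 0 < col
      rw [not_le] at hrow hcol
      have hr : row = ((row.toNat : Nat) : Int) := by omega
      have htot : max row 0 * max col 0 = row * col := by
        rw [max_eq_left (by omega), max_eq_left (by omega)]
      rw [htot, hr, pv_outer bombs col hcol row.toNat]
      rw [pv_sorted_eq bombs (((row.toNat : Nat) : Int) * col)]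
      exact pv_filterMap_ite (fun k => k ∈ bombs)
        (fun k => (PySem.Int.floordiv k col, PySem.Int.mod k col)) _
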